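-- pv_equiv track=rewrite | github.com/hyeonsangjeon/computing-Korean-STT-error-rates | nlptutti/asr_metrics.py | _measure_wer
-- ===== SOURCE A (Python) =====
-- from typing import Any, Dict, List, Tuple, Union
--
-- def levenshtein(u, v):
--     prev = None
--     curr = [0] + list(range(1, len(v) + 1))
--     # Operations: (SUB, DEL, INS)
--     prev_ops = None
--     curr_ops = [(0, 0, i) for i in range(len(v) + 1)]
--     for x in range(1, len(u) + 1):
--         prev, curr = curr, [x] + ([None] * len(v))
--         prev_ops, curr_ops = curr_ops, [(0, x, 0)] + ([None] * len(v))
--         for y in range(1, len(v) + 1):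
--             delcost = prev[y] + 1
--             addcost = curr[y - 1] + 1
--             subcost = prev[y - 1] + int(u[x - 1] != v[y - 1])
--             curr[y] = min(subcost, delcost, addcost)
--             if curr[y] == subcost:
--                 (n_s, n_d, n_i) = prev_ops[y - 1]
--                 curr_ops[y] = (n_s + int(u[x - 1] != v[y - 1]), n_d, n_i)
--             elif curr[y] == delcost:
--                 (n_s, n_d, n_i) = prev_ops[y]
--                 curr_ops[y] = (n_s, n_d + 1, n_i)
--             else:
--                 (n_s, n_d, n_i) = curr_ops[y - 1]
--                 curr_ops[y] = (n_s, n_d, n_i + 1)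
--     return curr[len(v)], curr_ops[len(v)]
--
-- def _measure_wer(
--         reference: str, transcription: str
-- ) -> Tuple[int, int, int, int]:
--     """
--     소스 문자열을 대상 문자열로 변환하는 데 필요한 편집 작업(삭제, 삽입, 바꾸기)의 수를 확인합니다.
--     hints 횟수는 소스 문자열의 전체 길이에서 삭제 및 대체 횟수를 빼서 제공할 수 있습니다.
--
--     :param transcription: 대상 단어
--     :param reference: 소스 단어
--     :return: a tuple of #hits, #substitutions, #deletions, #insertions
--     """
--
--     ref, hyp = [], []
--
--     ref.append(reference)
--     hyp.append(transcription)
--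
--     wer_s, wer_i, wer_d, wer_n = 0, 0, 0, 0
--     sen_err = 0
--
--     for n in range(len(ref)):
--         # update WER statistics
--         _, (s, i, d) = levenshtein(hyp[n].split(), ref[n].split())
--         wer_s += s
--         wer_i += i
--         wer_d += d
--         wer_n += len(ref[n].split())
--         # update SER statistics
--         if s + i + d > 0:
--             sen_err += 1
--
--     substitutions = wer_s
--     deletions = wer_d
--     insertions = wer_i
--     hits = len(reference.split()) - (substitutions + deletions)  # correct words between refs and trans
--
--     return hits, substitutions, deletions, insertions
-- ===== SOURCE B (Python) =====
-- def _measure_wer(reference, transcription):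
--     """Full-matrix Levenshtein + backtrack: fill a plain cost matrix over the
--     word lists, then walk back from the corner (diagonal first, then up, then
--     left) to recover the substitution/deletion/insertion counts."""
--     u = transcription.split()
--     v = reference.split()
--     n, m = len(u), len(v)
--     cost = [list(range(m + 1))]
--     for i in range(1, n + 1):
--         row = [i]
--         for j in range(1, m + 1):
--             row.append(min(cost[i - 1][j - 1] + (u[i - 1] != v[j - 1]),
--                            cost[i - 1][j] + 1,
--                            row[j - 1] + 1))
--         cost.append(row)
--     subs = dels = ins = 0
--     i, j = n, m
--     while i > 0 or j > 0:
--         if i > 0 and j > 0 and cost[i][j] == cost[i - 1][j - 1] + (u[i - 1] != v[j - 1]):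
--             subs += u[i - 1] != v[j - 1]
--             i -= 1
--             j -= 1
--         elif i > 0 and cost[i][j] == cost[i - 1][j] + 1:
--             ins += 1          # extra hypothesis word
--             i -= 1
--         else:
--             dels += 1         # reference word missing from the hypothesis
--             j -= 1
--     hits = m - (subs + dels)
--     return hits, subs, dels, ins
-- ===== Notes on version B (the rewrite author's own statement) =====
-- stated objective: alternative
-- what changed: A's levenshtein threads a (sub,del,ins) operation tuple through every DP cell as it fills the rows; B fills a plain Levenshtein cost matrix with no operation tracking and recovers the three counts afterwards by backtracking from the corner with the same diagonal/up/left tie-break priority.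
import Mathlib
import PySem

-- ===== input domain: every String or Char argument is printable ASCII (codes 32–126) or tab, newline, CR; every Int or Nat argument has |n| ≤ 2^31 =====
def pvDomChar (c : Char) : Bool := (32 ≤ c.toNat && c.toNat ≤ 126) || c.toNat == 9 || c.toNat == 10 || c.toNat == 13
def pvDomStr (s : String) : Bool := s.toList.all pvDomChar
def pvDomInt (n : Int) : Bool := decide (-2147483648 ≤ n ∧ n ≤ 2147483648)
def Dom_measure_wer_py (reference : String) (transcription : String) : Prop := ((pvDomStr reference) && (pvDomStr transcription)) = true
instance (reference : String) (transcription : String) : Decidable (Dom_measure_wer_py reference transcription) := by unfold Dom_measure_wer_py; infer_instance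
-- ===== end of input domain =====

-- B replaces A's forward row-by-row operation-tuple tracking by a plain cost
-- matrix followed by a backtrack from the corner (alternative decomposition).

-- ===== PORT A =====
-- inner loop 'for y in range(1, len(v)+1)' of levenshtein: walks the remaining
-- words of v together with the aligned tail of the previous row / previous ops
-- row, carrying curr[y-1] (c) and curr_ops[y-1] (co); returns the built row tails.
def levA_inner (ux : String) : List String → List Nat → List (Nat × Nat × Nat) →
    Nat → (Nat × Nat × Nat) → List Nat × List (Nat × Nat × Nat)
  | [], _, _, _, _ => ([], [])
  | w :: vs, p0 :: p1 :: ps, q0 :: q1 :: qs, c, co =>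
      let delcost := p1 + 1
      let addcost := c + 1
      let subcost := p0 + (if ux = w then 0 else 1)
      let cy := min subcost (min delcost addcost)
      let oy : Nat × Nat × Nat :=
        if cy = subcost then (q0.1 + (if ux = w then 0 else 1), q0.2.1, q0.2.2)
        else if cy = delcost then (q1.1, q1.2.1 + 1, q1.2.2)
        else (co.1, co.2.1, co.2.2 + 1)
      let rest := levA_inner ux vs (p1 :: ps) (q1 :: qs) cy oy
      (cy :: rest.1, oy :: rest.2)
  | _, _, _, _, _ => ([], [])  -- unreachable: prev rows always have length len(v)+1

-- outer loop 'for x in range(1, len(u)+1)': us = words of u not yet processed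
def levA_rows (vv : List String) : List String → Nat → List Nat →
    List (Nat × Nat × Nat) → List Nat × List (Nat × Nat × Nat)
  | [], _, curr, currOps => (curr, currOps)
  | w :: us, x, prev, prevOps =>
      let r := levA_inner w vv prev prevOps x (0, x, 0)
      levA_rows vv us (x + 1) (x :: r.1) ((0, x, 0) :: r.2)

def levA (uu vv : List String) : Nat × (Nat × Nat × Nat) :=
  let curr := List.range (vv.length + 1)
  let currOps := (List.range (vv.length + 1)).map (fun i => (0, 0, i))
  let fin := levA_rows vv uu 1 curr currOps
  (fin.1.getD vv.length 0, fin.2.getD vv.length (0, 0, 0))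

def measure_wer_py (reference : String) (transcription : String) : Int × Int × Int × Int :=
  let ref : List String := [reference]
  let hyp : List String := [transcription]
  -- state: (wer_s, wer_i, wer_d, wer_n, sen_err)
  let st := (List.range ref.length).foldl
    (fun (st : Nat × Nat × Nat × Nat × Nat) n =>
      let r := levA (PySem.Str.split₀ (hyp.getD n "")) (PySem.Str.split₀ (ref.getD n ""))
      let s := r.2.1
      let i := r.2.2.1
      let d := r.2.2.2
      (st.1 + s, st.2.1 + i, st.2.2.1 + d,
       st.2.2.2.1 + (PySem.Str.split₀ (ref.getD n "")).length,
       if s + i + d > 0 then st.2.2.2.2 + 1 else st.2.2.2.2))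
    (0, 0, 0, 0, 0)
  let substitutions := st.1
  let deletions := st.2.2.1
  let insertions := st.2.1
  let hits : Int := ((PySem.Str.split₀ reference).length : Int) - ((substitutions : Int) + (deletions : Int))
  (hits, (substitutions : Int), (deletions : Int), (insertions : Int))

-- ===== PORT B =====
-- inner loop 'for j in range(1, m+1)': remaining words of v, aligned tail of the
-- previous cost row, and row[j-1] (c)
def altRow (uw : String) : List String → List Nat → Nat → List Nat
  | [], _, _ => []
  | w :: vs, p0 :: p1 :: ps, c =>
      let cy := min (p0 + (if uw = w then 0 else 1)) (min (p1 + 1) (c + 1))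
      cy :: altRow uw vs (p1 :: ps) cy
  | _, _, _ => []  -- unreachable: the previous row always has length m+1

-- 'for i in range(1, n+1)': build the matrix, appending each finished row
def altRows (v : List String) : List String → Nat → List Nat → List (List Nat) → List (List Nat)
  | [], _, _, acc => acc
  | w :: us, i, prevRow, acc =>
      let row := i :: altRow w v prevRow i
      altRows v us (i + 1) row (acc ++ [row])

def altCell (M : List (List Nat)) (i j : Nat) : Nat := (M.getD i []).getD j 0

-- the backtrack while-loop; fuel = n + m bounds its iterations
def altBack (uu vv : List String) (M : List (List Nat)) :
    Nat → Nat → Nat → Nat → Nat → Nat → Nat × Nat × Nat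
  | 0, _, _, subs, dels, ins => (subs, dels, ins)
  | fuel + 1, i, j, subs, dels, ins =>
      if 0 < i ∨ 0 < j then
        let nq := if uu.getD (i - 1) "" = vv.getD (j - 1) "" then 0 else 1
        if 0 < i ∧ 0 < j ∧ altCell M i j = altCell M (i - 1) (j - 1) + nq then
          altBack uu vv M fuel (i - 1) (j - 1) (subs + nq) dels ins
        else if 0 < i ∧ altCell M i j = altCell M (i - 1) j + 1 then
          altBack uu vv M fuel (i - 1) j subs dels (ins + 1)
        else
          altBack uu vv M fuel i (j - 1) subs (dels + 1) ins
      else (subs, dels, ins)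

def measure_wer_py_alt (reference : String) (transcription : String) : Int × Int × Int × Int :=
  let u := PySem.Str.split₀ transcription
  let v := PySem.Str.split₀ reference
  let n := u.length
  let m := v.length
  let row0 := List.range (m + 1)
  let M := altRows v u 1 row0 [row0]
  let r := altBack u v M (n + m) n m 0 0 0
  let hits : Int := (m : Int) - ((r.1 : Int) + (r.2.1 : Int))
  (hits, (r.1 : Int), (r.2.1 : Int), (r.2.2 : Int))

-- ===== PRECONDITION & SPEC =====
def Spec_measure_wer_py (reference : String) (transcription : String) (out : Int × Int × Int × Int) : Prop := out = measure_wer_py_alt reference transcription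
instance (reference : String) (transcription : String) (out : Int × Int × Int × Int) : Decidable (Spec_measure_wer_py reference transcription out) := by unfold Spec_measure_wer_py; infer_instance

-- ===== CLAIM (what is proved, stated in full; the proofs are below) =====
def Claim_equal_measure_wer_py : Prop := ∀ (reference : String) (transcription : String), Dom_measure_wer_py reference transcription → Spec_measure_wer_py reference transcription (measure_wer_py reference transcription)

-- ===== LEMMAS AND PROOFS =====

-- the mathematical Levenshtein cost table both ports compute
def nq (u v : List String) (i j : Nat) : Nat := if u.getD i "" = v.getD j "" then 0 else 1

def Cm (u v : List String) : Nat → Nat → Nat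
  | 0, j => j
  | i + 1, 0 => i + 1
  | i + 1, j + 1 =>
      min (Cm u v i j + nq u v i j) (min (Cm u v i (j + 1) + 1) (Cm u v (i + 1) j + 1))
  termination_by i j => (i, j)

-- the operation-count table, with A's tie-break priority (sub, then del, then ins)
def Om (u v : List String) : Nat → Nat → Nat × Nat × Nat
  | 0, j => (0, 0, j)
  | i + 1, 0 => (0, i + 1, 0)
  | i + 1, j + 1 =>
      let e := nq u v i j
      let sub := Cm u v i j + e
      let del := Cm u v i (j + 1) + 1
      let add := Cm u v (i + 1) j + 1
      let mn := min sub (min del add)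
      if mn = sub then ((Om u v i j).1 + e, (Om u v i j).2.1, (Om u v i j).2.2)
      else if mn = del then ((Om u v i (j + 1)).1, (Om u v i (j + 1)).2.1 + 1, (Om u v i (j + 1)).2.2)
      else ((Om u v (i + 1) j).1, (Om u v (i + 1) j).2.1, (Om u v (i + 1) j).2.2 + 1)
  termination_by i j => (i, j)

theorem levA_inner_spec (u v : List String) (i : Nat) :
    ∀ (vs : List String) (j : Nat), vs = v.drop j →
    levA_inner (u.getD i "") vs
      ((List.range' j (vs.length + 1)).map (Cm u v i))
      ((List.range' j (vs.length + 1)).map (Om u v i))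
      (Cm u v (i + 1) j) (Om u v (i + 1) j)
    = ((List.range' (j + 1) vs.length).map (Cm u v (i + 1)),
       (List.range' (j + 1) vs.length).map (Om u v (i + 1))) := by
  intro vs
  induction vs with
  | nil => intro j h; simp [levA_inner]
  | cons w vs' ih =>
    intro j h
    have hj0 : v[j]? = some w := by
      have h0 : (v.drop j)[0]? = some w := by rw [← h]; rfl
      simpa using h0
    have hw : v.getD j "" = w := by simp [List.getD_eq_getElem?_getD, hj0]
    have hdrop : vs' = v.drop (j + 1) := by
      rw [← List.drop_drop, ← h]; rfl
    have hsub : (if u.getD i "" = w then 0 else 1) = nq u v i j := by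
      rw [nq, hw]
    have ihj := ih (j + 1) hdrop
    simp only [List.length_cons, List.range'_succ, List.map_cons] at ihj ⊢
    simp only [levA_inner, hsub]
    have hcy : min (Cm u v i j + nq u v i j)
        (min (Cm u v i (j + 1) + 1) (Cm u v (i + 1) j + 1)) = Cm u v (i + 1) (j + 1) := by
      rw [Cm]
    have hoy : (if Cm u v (i + 1) (j + 1) = Cm u v i j + nq u v i j then
           ((Om u v i j).1 + nq u v i j, (Om u v i j).2.1, (Om u v i j).2.2)
         else if Cm u v (i + 1) (j + 1) = Cm u v i (j + 1) + 1 then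
           ((Om u v i (j + 1)).1, (Om u v i (j + 1)).2.1 + 1, (Om u v i (j + 1)).2.2)
         else ((Om u v (i + 1) j).1, (Om u v (i + 1) j).2.1, (Om u v (i + 1) j).2.2 + 1))
        = Om u v (i + 1) (j + 1) := by
      conv_rhs => rw [Om]
      rw [hcy]
    rw [hcy, hoy, ihj]

theorem levA_rows_spec (u v : List String) :
    ∀ (us : List String) (i : Nat), us = u.drop i →
    levA_rows v us (i + 1)
      ((List.range (v.length + 1)).map (Cm u v i))
      ((List.range (v.length + 1)).map (Om u v i))
    = ((List.range (v.length + 1)).map (Cm u v (i + us.length)),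
       (List.range (v.length + 1)).map (Om u v (i + us.length))) := by
  intro us
  induction us with
  | nil => intro i h; simp [levA_rows]
  | cons w us' ih =>
    intro i h
    have hw : u.getD i "" = w := by
      have h0 : (u.drop i)[0]? = some w := by rw [← h]; rfl
      simp at h0
      simp [List.getD_eq_getElem?_getD, h0]
    have hdrop : us' = u.drop (i + 1) := by
      rw [← List.drop_drop, ← h]; rfl
    have hC0 : Cm u v (i + 1) 0 = i + 1 := by rw [Cm]
    have hO0 : Om u v (i + 1) 0 = (0, i + 1, 0) := by rw [Om]
    have hinner := levA_inner_spec u v i v 0 (by simp)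
    rw [hC0, hO0] at hinner
    simp only [levA_rows, List.range_eq_range', ← hw, Nat.zero_add, hinner]
    have hrow : (i + 1) :: List.map (Cm u v (i + 1)) (List.range' 1 v.length)
        = List.map (Cm u v (i + 1)) (List.range' 0 (v.length + 1)) := by
      rw [List.range'_succ, List.map_cons, hC0]
    have hrowO : ((0 : Nat), i + 1, (0 : Nat)) :: List.map (Om u v (i + 1)) (List.range' 1 v.length)
        = List.map (Om u v (i + 1)) (List.range' 0 (v.length + 1)) := by
      rw [List.range'_succ, List.map_cons, hO0]
    have ih' := ih (i + 1) hdrop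
    simp only [List.range_eq_range'] at ih'
    rw [hrow, hrowO, ih']
    have : i + 1 + us'.length = i + (us'.length + 1) := by omega
    rw [this]
    simp

theorem row0_eq (u v : List String) :
    (List.range (v.length + 1)).map (Cm u v 0) = List.range (v.length + 1) := by
  conv_rhs => rw [← List.map_id (List.range (v.length + 1))]
  exact List.map_congr_left (fun j _ => by rw [Cm]; rfl)

theorem opsRow0_eq (u v : List String) :
    (List.range (v.length + 1)).map (Om u v 0)
      = (List.range (v.length + 1)).map (fun i => ((0 : Nat), (0 : Nat), i)) := by
  refine List.map_congr_left (fun j _ => ?_)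
  rw [Om]

theorem levA_spec (u v : List String) :
    levA u v = (Cm u v u.length v.length, Om u v u.length v.length) := by
  have h := levA_rows_spec u v u 0 (by simp)
  simp only [Nat.zero_add, row0_eq, opsRow0_eq] at h
  simp only [levA, h]
  simp

theorem altRow_spec (u v : List String) (i : Nat) :
    ∀ (vs : List String) (j : Nat), vs = v.drop j →
    altRow (u.getD i "") vs ((List.range' j (vs.length + 1)).map (Cm u v i)) (Cm u v (i + 1) j)
    = (List.range' (j + 1) vs.length).map (Cm u v (i + 1)) := by
  intro vs
  induction vs with
  | nil => intro j h; simp [altRow]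
  | cons w vs' ih =>
    intro j h
    have hj0 : v[j]? = some w := by
      have h0 : (v.drop j)[0]? = some w := by rw [← h]; rfl
      simpa using h0
    have hw : v.getD j "" = w := by simp [List.getD_eq_getElem?_getD, hj0]
    have hsub : (if u.getD i "" = w then 0 else 1) = nq u v i j := by
      rw [nq, hw]
    have hdrop : vs' = v.drop (j + 1) := by
      rw [← List.drop_drop, ← h]; rfl
    have ihj := ih (j + 1) hdrop
    simp only [List.length_cons, List.range'_succ, List.map_cons] at ihj ⊢
    simp only [altRow, hsub]
    have hcy : min (Cm u v i j + nq u v i j)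
        (min (Cm u v i (j + 1) + 1) (Cm u v (i + 1) j + 1)) = Cm u v (i + 1) (j + 1) := by
      rw [Cm]
    rw [hcy, ihj]

def rowL (u v : List String) (k : Nat) : List Nat :=
  (List.range (v.length + 1)).map (Cm u v k)

theorem altRows_spec (u v : List String) :
    ∀ (us : List String) (k : Nat) (acc : List (List Nat)), us = u.drop k →
    altRows v us (k + 1) (rowL u v k) acc
    = acc ++ (List.range' (k + 1) us.length).map (rowL u v) := by
  intro us
  induction us with
  | nil => intro k acc h; simp [altRows]
  | cons w us' ih =>
    intro k acc h
    have hw : u.getD k "" = w := by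
      have h0 : (u.drop k)[0]? = some w := by rw [← h]; rfl
      simp at h0
      simp [List.getD_eq_getElem?_getD, h0]
    have hdrop : us' = u.drop (k + 1) := by
      rw [← List.drop_drop, ← h]; rfl
    have hC0 : Cm u v (k + 1) 0 = k + 1 := by rw [Cm]
    have hrow := altRow_spec u v k v 0 (by simp)
    rw [hC0] at hrow
    have hrowL : (k + 1) :: List.map (Cm u v (k + 1)) (List.range' 1 v.length) = rowL u v (k + 1) := by
      rw [rowL, List.range_eq_range', List.range'_succ, List.map_cons, hC0]
    simp only [altRows, ← hw, rowL, List.range_eq_range', Nat.zero_add] at hrow ⊢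
    rw [hrow, hrowL, ih (k + 1) _ hdrop]
    simp [List.range'_succ]

theorem altCell_spec (u v : List String) (i j : Nat) (hi : i ≤ u.length) (hj : j ≤ v.length) :
    altCell ((List.range (u.length + 1)).map (rowL u v)) i j = Cm u v i j := by
  have hi' : i < u.length + 1 := by omega
  have hj' : j < v.length + 1 := by omega
  simp [altCell, rowL, List.getD_eq_getElem?_getD, hi', hj']

theorem Cm_row0 (u v : List String) (a : Nat) : Cm u v a 0 = a := by
  cases a <;> rw [Cm]

theorem Om_row0 (u v : List String) (a : Nat) : Om u v a 0 = (0, a, 0) := by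
  cases a <;> rw [Om]

theorem Om_col0 (u v : List String) (b : Nat) : Om u v 0 b = (0, 0, b) := by
  rw [Om]

theorem altBack_spec (u v : List String) :
    ∀ (fuel i j subs dels ins : Nat), i ≤ u.length → j ≤ v.length → i + j ≤ fuel →
    altBack u v ((List.range (u.length + 1)).map (rowL u v)) fuel i j subs dels ins
    = (subs + (Om u v i j).1, dels + (Om u v i j).2.2, ins + (Om u v i j).2.1) := by
  intro fuel
  induction fuel with
  | zero =>
    intro i j s d e hi hj hf
    obtain ⟨rfl, rfl⟩ : i = 0 ∧ j = 0 := by omega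
    simp [altBack, Om_row0]
  | succ fuel ih =>
    intro i j s d e hi hj hf
    rcases i with _ | i' <;> rcases j with _ | j'
    · simp [altBack, Om_row0]
    · -- i = 0, j = j' + 1
      simp only [altBack]
      rw [if_pos (by omega : (0 : Nat) < 0 ∨ 0 < j' + 1)]
      rw [if_neg (by omega : ¬((0 : Nat) < 0 ∧ 0 < j' + 1 ∧
        altCell ((List.range (u.length + 1)).map (rowL u v)) 0 (j' + 1)
          = altCell ((List.range (u.length + 1)).map (rowL u v)) (0 - 1) (j' + 1 - 1)
            + if u.getD (0 - 1) "" = v.getD (j' + 1 - 1) "" then 0 else 1))]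
      rw [if_neg (by omega : ¬((0 : Nat) < 0 ∧
        altCell ((List.range (u.length + 1)).map (rowL u v)) 0 (j' + 1)
          = altCell ((List.range (u.length + 1)).map (rowL u v)) (0 - 1) (j' + 1) + 1))]
      rw [show j' + 1 - 1 = j' from rfl, ih 0 j' s (d + 1) e (by omega) (by omega) (by omega)]
      rw [Om_col0, Om_col0]
      simp [Prod.mk.injEq]; omega
    · -- i = i' + 1, j = 0
      have c1 := altCell_spec u v (i' + 1) 0 hi (by omega)
      have c2 := altCell_spec u v i' 0 (by omega) (by omega)
      simp only [altBack]
      rw [if_pos (by omega : (0 : Nat) < i' + 1 ∨ 0 < 0)]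
      rw [if_neg (by omega : ¬((0 : Nat) < i' + 1 ∧ 0 < 0 ∧
        altCell ((List.range (u.length + 1)).map (rowL u v)) (i' + 1) 0
          = altCell ((List.range (u.length + 1)).map (rowL u v)) (i' + 1 - 1) (0 - 1)
            + if u.getD (i' + 1 - 1) "" = v.getD (0 - 1) "" then 0 else 1))]
      rw [if_pos (by
        refine ⟨by omega, ?_⟩
        rw [show i' + 1 - 1 = i' from rfl, c1, c2, Cm_row0, Cm_row0] :
        ((0 : Nat) < i' + 1 ∧
        altCell ((List.range (u.length + 1)).map (rowL u v)) (i' + 1) 0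
          = altCell ((List.range (u.length + 1)).map (rowL u v)) (i' + 1 - 1) 0 + 1))]
      rw [show i' + 1 - 1 = i' from rfl, ih i' 0 s d (e + 1) (by omega) (by omega) (by omega)]
      rw [Om_row0, Om_row0]
      simp [Prod.mk.injEq]; omega
    · -- i = i' + 1, j = j' + 1
      have c00 := altCell_spec u v (i' + 1) (j' + 1) hi hj
      have c01 := altCell_spec u v i' (j' + 1) (by omega) hj
      have c10 := altCell_spec u v (i' + 1) j' hi (by omega)
      have c11 := altCell_spec u v i' j' (by omega) (by omega)
      simp only [altBack, Nat.add_sub_cancel]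
      rw [if_pos (by omega : (0 : Nat) < i' + 1 ∨ 0 < j' + 1)]
      rw [c00, c01, c11]
      have hnq : (if u.getD i' "" = v.getD j' "" then (0 : Nat) else 1) = nq u v i' j' := rfl
      rw [hnq]
      have hC : Cm u v (i' + 1) (j' + 1) = min (Cm u v i' j' + nq u v i' j')
          (min (Cm u v i' (j' + 1) + 1) (Cm u v (i' + 1) j' + 1)) := by rw [Cm]
      conv_rhs => rw [Om]
      rw [← hC]
      simp only [Nat.zero_lt_succ, true_and]
      split_ifs with h1 h2
      · rw [ih i' j' (s + nq u v i' j') d e (by omega) (by omega) (by omega)]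
        simp [Prod.mk.injEq]; omega
      · rw [ih i' (j' + 1) s d (e + 1) (by omega) (by omega) (by omega)]
        simp [Prod.mk.injEq]; omega
      · rw [ih (i' + 1) j' s (d + 1) e (by omega) (by omega) (by omega)]
        simp [Prod.mk.injEq]; omega

-- ===== VERDICT (by name: the statement is the Claim_ definition above) =====
theorem measure_wer_py_spec : Claim_equal_measure_wer_py := by
  intro reference transcription _
  unfold Spec_measure_wer_py measure_wer_py measure_wer_py_alt
  simp only [List.length_cons, List.length_nil, List.range_one, List.foldl_cons,
    List.foldl_nil, List.getD_cons_zero, Nat.zero_add]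
  rw [levA_spec]
  have hr0 : List.range ((PySem.Str.split₀ reference).length + 1)
      = rowL (PySem.Str.split₀ transcription) (PySem.Str.split₀ reference) 0 :=
    (row0_eq _ _).symm
  rw [hr0]
  have hM := altRows_spec (PySem.Str.split₀ transcription) (PySem.Str.split₀ reference)
    (PySem.Str.split₀ transcription) 0
    [rowL (PySem.Str.split₀ transcription) (PySem.Str.split₀ reference) 0] (by simp)
  simp only [Nat.zero_add] at hM
  rw [hM]
  have hM2 : [rowL (PySem.Str.split₀ transcription) (PySem.Str.split₀ reference) 0]
      ++ (List.range' 1 (PySem.Str.split₀ transcription).length).map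
          (rowL (PySem.Str.split₀ transcription) (PySem.Str.split₀ reference))
      = (List.range ((PySem.Str.split₀ transcription).length + 1)).map
          (rowL (PySem.Str.split₀ transcription) (PySem.Str.split₀ reference)) := by
    rw [List.range_eq_range', List.range'_succ]
    simp
  rw [hM2]
  rw [altBack_spec (PySem.Str.split₀ transcription) (PySem.Str.split₀ reference)
    ((PySem.Str.split₀ transcription).length + (PySem.Str.split₀ reference).length)
    (PySem.Str.split₀ transcription).length (PySem.Str.split₀ reference).length
    0 0 0 le_rfl le_rfl le_rfl]
  simp
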